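-- pv_equiv track=rewrite | github.com/lekez2005/opennvram-reram | compiler/tests/reram/caravel/reram_wrapper.py | alternate_bits
-- ===== SOURCE A (Python) =====
-- import math
--
-- def alternate_bits(bits):
--     num_bits = len(bits)
--     half_bits = math.floor(num_bits / 2)
--     alt_bits = []
--     for i in range(half_bits):
--         alt_bits.append(bits[i + half_bits])
--         alt_bits.append(bits[half_bits - i - 1])
--     if num_bits % 2 == 1:
--         alt_bits.append(bits[-1])
--     return alt_bits
-- ===== SOURCE B (Python) =====
-- def alternate_bits(bits):
--     half = len(bits) // 2
--     stack = bits[:half]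
--     out = []
--     for b in bits[half:]:
--         out.append(b)
--         if stack:
--             out.append(stack.pop())
--     return out
-- ===== Notes on version B (the rewrite author's own statement) =====
-- stated objective: alternative
-- what changed: Replaces A's indexed loop with paired index arithmetic and an explicit odd-middle append by a stack consumption: the first half becomes a stack and one uniform loop over the second half pops from it, making the middle element fall out naturally.
import Mathlib
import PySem

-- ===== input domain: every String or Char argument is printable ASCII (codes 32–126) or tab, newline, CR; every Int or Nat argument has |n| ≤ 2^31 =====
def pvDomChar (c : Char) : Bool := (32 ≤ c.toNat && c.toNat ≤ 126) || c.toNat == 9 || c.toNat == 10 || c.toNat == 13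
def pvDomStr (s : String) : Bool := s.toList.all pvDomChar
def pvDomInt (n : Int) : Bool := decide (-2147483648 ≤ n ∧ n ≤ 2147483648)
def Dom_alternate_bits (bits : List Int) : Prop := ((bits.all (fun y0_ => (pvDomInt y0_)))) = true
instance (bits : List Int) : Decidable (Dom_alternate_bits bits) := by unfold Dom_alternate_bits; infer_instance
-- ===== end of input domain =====

-- B replaces A's indexed loop (paired index arithmetic + explicit odd-middle append) by one uniform
-- pass over the second half that pops elements off a stack holding the first half; alternative
-- decomposition, same cost.

-- ===== PORT A =====
-- math.floor(num_bits / 2) on a length is exact integer floor division (lengths are far below 2^53).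
-- All loop indices are provably in range, so pyGetD's default 0 is never used.
def alternate_bits (bits : List Int) : List Int :=
  let num_bits : Int := PySem.List.len bits
  let half_bits : Int := PySem.Int.floordiv num_bits 2
  let alt_bits : List Int :=
    (PySem.List.pyRange 0 half_bits 1).foldl
      (fun acc i =>
        (acc ++ [PySem.List.pyGetD bits (i + half_bits) 0]) ++
          [PySem.List.pyGetD bits (half_bits - i - 1) 0]) []
  if PySem.Int.mod num_bits 2 == 1 then
    alt_bits ++ [PySem.List.pyGetD bits (-1) 0]
  else alt_bits

-- ===== PORT B =====
-- stack.pop() removes and returns the LAST element: ported as (dropLast, getLastD); the getLastD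
-- default 0 is only read behind the nonemptiness test, exactly like Python's guarded pop.
-- bits[:half] / bits[half:] are nonnegative in-range slices, ported as take/drop (PySem.List.slice
-- agrees with take/drop there).
def altStackStep (st : List Int × List Int) (b : Int) : List Int × List Int :=
  let out := st.2 ++ [b]
  if st.1.isEmpty then (st.1, out)
  else (st.1.dropLast, out ++ [st.1.getLastD 0])

def alternate_bits_alt (bits : List Int) : List Int :=
  let half : Nat := bits.length / 2
  ((bits.drop half).foldl altStackStep (bits.take half, [])).2

-- ===== PRECONDITION & SPEC =====
def Spec_alternate_bits (bits : List Int) (out : List Int) : Prop := out = alternate_bits_alt bits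
instance (bits : List Int) (out : List Int) : Decidable (Spec_alternate_bits bits out) := by unfold Spec_alternate_bits; infer_instance

-- ===== CLAIM =====
def Claim_equal_alternate_bits : Prop := ∀ (bits : List Int), Dom_alternate_bits bits → Spec_alternate_bits bits (alternate_bits bits)

-- ===== LEMMAS AND PROOFS =====

-- A's loop body 'append; append' as a flatMap of two-element blocks.
theorem foldl_two_appends (f g : Int → Int) (l : List Int) (acc : List Int) :
    l.foldl (fun acc i => (acc ++ [f i]) ++ [g i]) acc
      = acc ++ l.flatMap (fun i => [f i, g i]) := by
  induction l generalizing acc with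
  | nil => simp
  | cons x xs ih => simp [List.append_assoc, List.flatMap]

-- B's stack fold, characterised: interleave l with the reversed stack, then the unmatched tail of l.
theorem foldl_stack (l : List Int) : ∀ (s out : List Int), l.length ≤ s.length + 1 →
    (l.foldl altStackStep (s, out)).2
      = out ++ (l.zip s.reverse).flatMap (fun p => [p.1, p.2])
          ++ (if s.length < l.length then [l.getLastD 0] else []) := by
  induction l with
  | nil => intro s out _; simp
  | cons b l' ih =>
    intro s out hlen
    rcases s.eq_nil_or_concat with rfl | ⟨s', a, rfl⟩
    · have hl' : l' = [] := by
        simp only [List.length_cons, List.length_nil] at hlen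
        exact List.eq_nil_of_length_eq_zero (by omega)
      subst hl'
      simp [altStackStep]
    · rw [List.concat_eq_append] at *
      have hstep : altStackStep (s' ++ [a], out) b = (s', out ++ [b] ++ [a]) := by
        simp [altStackStep]
      simp only [List.foldl_cons, hstep]
      rw [ih s' (out ++ [b] ++ [a]) (by simp at hlen ⊢; omega)]
      have hrev : (s' ++ [a]).reverse = a :: s'.reverse := by simp
      simp only [hrev, List.zip_cons_cons, List.flatMap_cons, List.length_append, List.length_cons]
      by_cases hc : s'.length < l'.length
      · cases l' with
        | nil => simp at hc
        | cons c cs =>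
          simp [List.append_assoc, List.getLast?_cons_cons]
      · have hcc : ¬ s'.length + 1 < l'.length + 1 := by omega
        simp [hc, hcc, List.append_assoc]

-- the canonical result both loops compute before the middle element.
def altCanon (bits : List Int) : List Int :=
  (List.range (bits.length / 2)).flatMap
    (fun k => [bits.getD (bits.length / 2 + k) 0, bits.getD (bits.length / 2 - 1 - k) 0])

-- the zip of (drop h) with the reversed (take h), element by element, matches A's index pairs.
theorem zip_drop_take_rev (bits : List Int) :
    (bits.drop (bits.length / 2)).zip ((bits.take (bits.length / 2)).reverse)
      = (List.range (bits.length / 2)).map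
          (fun k => (bits.getD (bits.length / 2 + k) 0,
                     bits.getD (bits.length / 2 - 1 - k) 0)) := by
  set n := bits.length with hn
  set h := n / 2 with hh
  apply List.ext_getElem
  · simp [List.length_zip, hn.symm]
    omega
  · intro k hk1 hk2
    have hlen : ((bits.drop h).zip ((bits.take h).reverse)).length = h := by
      simp [List.length_zip, hn.symm]; omega
    rw [hlen] at hk1
    have hk : k < h := hk1
    have hkn : h + k < n := by omega
    have hkh : h - 1 - k < h := by omega
    simp only [List.getElem_zip, List.getElem_map, List.getElem_range, Prod.mk.injEq]
    constructor
    · rw [List.getElem_drop]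
      rw [List.getD_eq_getElem bits 0 (by omega)]
    · rw [List.getElem_reverse, List.getElem_take]
      rw [List.getD_eq_getElem bits 0 (by omega)]
      congr 1
      simp [hn.symm]
      omega

-- A's loop equals the canonical interleave.
theorem A_loop_eq_canon (bits : List Int) :
    (PySem.List.pyRange 0 ((bits.length / 2 : Nat) : Int) 1).foldl
      (fun acc i =>
        (acc ++ [PySem.List.pyGetD bits (i + ((bits.length / 2 : Nat) : Int)) 0]) ++
          [PySem.List.pyGetD bits (((bits.length / 2 : Nat) : Int) - i - 1) 0]) []
    = altCanon bits := by
  rw [foldl_two_appends, List.nil_append, PySem.List.pyRange_one]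
  have h0 : ((bits.length / 2 : Nat) : Int) - 0 = ((bits.length / 2 : Nat) : Int) := by omega
  rw [h0, Int.toNat_natCast, List.flatMap_map]
  unfold altCanon List.flatMap
  apply congrArg List.flatten
  apply List.map_congr_left
  intro k hk
  rw [List.mem_range] at hk
  set h := bits.length / 2 with hh
  have e1 : ((0 : Int) + (k : Int) + (h : Nat)) = ((h + k : Nat) : Int) := by push_cast; ring
  have e2 : ((h : Nat) : Int) - ((0 : Int) + (k : Int)) - 1 = ((h - 1 - k : Nat) : Int) := by
    omega
  simp only [e1, e2, PySem.List.pyGetD_natCast]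

-- B's stack fold equals the canonical interleave plus the middle element.
theorem B_fold_eq_canon (bits : List Int) :
    ((bits.drop (bits.length / 2)).foldl altStackStep (bits.take (bits.length / 2), [])).2
      = altCanon bits ++ (if bits.length % 2 = 1 then [PySem.List.pyGetD bits (-1) 0] else []) := by
  set n := bits.length with hn
  set h := n / 2 with hh
  rw [foldl_stack (bits.drop h) (bits.take h) [] (by simp [hn.symm]; omega), List.nil_append]
  rw [zip_drop_take_rev, List.flatMap_map]
  unfold altCanon
  congr 1
  have hcond : ((bits.take h).length < (bits.drop h).length) ↔ (n % 2 = 1) := by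
    simp [hn.symm]; omega
  by_cases hodd : n % 2 = 1
  · have hne : bits ≠ [] := by
      intro he
      rw [he] at hn
      simp at hn
      omega
    have hdropne : bits.drop h ≠ [] := by
      intro he
      have := congrArg List.length he
      simp [hn.symm] at this; omega
    have hmid : (bits.drop h).getLastD 0 = PySem.List.pyGetD bits (-1) 0 := by
      rw [PySem.List.pyGetD_neg_one (xs := bits) (d := 0) hne]
      rw [List.getLastD_eq_getLast?, List.getLast?_eq_some_getLast hdropne]
      rw [Option.getD_some, List.getLast_drop]
    rw [if_pos (hcond.mpr hodd), if_pos hodd, hmid]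
  · rw [if_neg (fun hx => hodd (hcond.mp hx)), if_neg hodd]

theorem alternate_bits_eq_alt (bits : List Int) :
    alternate_bits bits = alternate_bits_alt bits := by
  unfold alternate_bits alternate_bits_alt
  have hfd : PySem.Int.floordiv (PySem.List.len bits) 2 = ((bits.length / 2 : Nat) : Int) := by
    simp [PySem.List.len]
  have hmod : PySem.Int.mod (PySem.List.len bits) 2 = ((bits.length % 2 : Nat) : Int) := by
    simp [PySem.List.len]
  simp only [hfd, hmod, A_loop_eq_canon, B_fold_eq_canon]
  by_cases hodd : bits.length % 2 = 1
  · simp [hodd]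
  · have h0 : bits.length % 2 = 0 := by omega
    simp [h0]

-- ===== VERDICT =====
theorem alternate_bits_spec : Claim_equal_alternate_bits := by
  intro bits _
  unfold Spec_alternate_bits
  exact alternate_bits_eq_alt bits
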